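-- pv_equiv track=rewrite | github.com/mrsac7/pa45 | pa4.py | gen_LFG
-- ===== SOURCE A (Python) =====
-- def gen_LFG(i, j, n, lfg):
--     lfg_li = []
--     lfg_mod = 1145
--     for i1 in range(n):
--         lfg_li.append((lfg[i - 1] + lfg[j - 1]) % lfg_mod)
--         lfg = lfg[1:]
--         lfg.append(lfg_li[-1])
--     return lfg_li
-- ===== SOURCE B (Python) =====
-- def gen_LFG(i, j, n, lfg):
--     # Flat growing sequence with a moving base instead of re-slicing the window each step.
--     L = len(lfg)
--     a = i - 1 + (L if i - 1 < 0 else 0)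
--     b = j - 1 + (L if j - 1 < 0 else 0)
--     S = list(lfg)
--     for t in range(n):
--         S.append((S[t + a] + S[t + b]) % 1145)
--     return S[L:]
-- ===== Notes on version B (the rewrite author's own statement) =====
-- stated objective: faster
-- what changed: B keeps one flat growing list and reads the two lagged terms by index with a moving base, instead of A's per-step copy of the whole window via lfg[1:] slicing.
import Mathlib
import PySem

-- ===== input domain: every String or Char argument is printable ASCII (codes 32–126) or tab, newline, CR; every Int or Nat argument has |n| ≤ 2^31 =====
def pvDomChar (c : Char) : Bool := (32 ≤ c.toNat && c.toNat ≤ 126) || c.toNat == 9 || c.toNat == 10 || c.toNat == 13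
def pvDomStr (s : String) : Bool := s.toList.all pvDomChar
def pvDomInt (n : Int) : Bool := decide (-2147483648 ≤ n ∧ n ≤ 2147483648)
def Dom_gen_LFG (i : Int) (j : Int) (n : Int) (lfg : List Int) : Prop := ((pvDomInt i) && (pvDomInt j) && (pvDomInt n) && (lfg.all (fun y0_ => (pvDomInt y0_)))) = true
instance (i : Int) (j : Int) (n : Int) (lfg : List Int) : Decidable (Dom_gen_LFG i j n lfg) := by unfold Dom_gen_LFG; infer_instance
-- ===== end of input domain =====

-- B keeps one flat growing list read with a moving base instead of A's per-step window copy (O(n+L) vs O(n*L)).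

-- ===== PORT A =====
def gen_LFG (i : Int) (j : Int) (n : Int) (lfg : List Int) : List Int :=
  (((PySem.List.pyRange 0 n 1).foldl (fun (st : List Int × List Int) _ =>
      let v := PySem.Int.mod (PySem.List.pyGetD st.2 (i - 1) 0 + PySem.List.pyGetD st.2 (j - 1) 0) 1145
      (st.1 ++ [v], PySem.List.slice st.2 (some 1) none ++ [v]))
    (([] : List Int), lfg))).1

-- ===== PORT B =====
def gen_LFG_alt (i : Int) (j : Int) (n : Int) (lfg : List Int) : List Int :=
  let L : Int := lfg.length
  let a : Int := if i - 1 < 0 then i - 1 + L else i - 1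
  let b : Int := if j - 1 < 0 then j - 1 + L else j - 1
  let S := (PySem.List.pyRange 0 n 1).foldl (fun (S : List Int) t =>
      S ++ [PySem.Int.mod (PySem.List.pyGetD S (t + a) 0 + PySem.List.pyGetD S (t + b) 0) 1145]) lfg
  PySem.List.slice S (some L) none

-- ===== PRECONDITION & SPEC =====
-- Pre_ excludes exactly the inputs on which A raises IndexError: n > 0 with a lag index out of range
-- of the length-L window (indices are only read when n > 0, so n ≤ 0 always returns []).
def Pre_gen_LFG (i : Int) (j : Int) (n : Int) (lfg : List Int) : Prop :=
  n ≤ 0 ∨ (PySem.Raise.InRange lfg.length (i - 1) ∧ PySem.Raise.InRange lfg.length (j - 1))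
instance (i : Int) (j : Int) (n : Int) (lfg : List Int) : Decidable (Pre_gen_LFG i j n lfg) := by unfold Pre_gen_LFG; infer_instance

def pvWitness_gen_LFG : Int × Int × Int × List Int := (1, 2, 5, [1, 1])

def Spec_gen_LFG (i : Int) (j : Int) (n : Int) (lfg : List Int) (out : List Int) : Prop := out = gen_LFG_alt i j n lfg
instance (i : Int) (j : Int) (n : Int) (lfg : List Int) (out : List Int) : Decidable (Spec_gen_LFG i j n lfg out) := by unfold Spec_gen_LFG; infer_instance

-- ===== CLAIM (what is proved, stated in full; the proofs are below) =====
def Claim_equal_gen_LFG : Prop := ∀ (i : Int) (j : Int) (n : Int) (lfg : List Int), Dom_gen_LFG i j n lfg → Pre_gen_LFG i j n lfg → Spec_gen_LFG i j n lfg (gen_LFG i j n lfg)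

-- ===== LEMMAS AND PROOFS =====

-- Python in-range index (possibly negative), as a total getElem? read at the normalized offset.
theorem pyGetD_inrange (xs : List Int) (t d : Int)
    (h1 : -(xs.length : Int) ≤ t) (h2 : t < (xs.length : Int)) :
    PySem.List.pyGetD xs t d = (xs[(if t < 0 then t + xs.length else t).toNat]?).getD d := by
  by_cases hn : t < 0
  · rw [if_pos hn]
    have ht' : -(((-t).toNat : Nat) : Int) = t := by omega
    have h := PySem.List.pyGetD_neg_natCast xs (-t).toNat d (by omega) (by omega)
    rw [ht'] at h
    rw [h, List.getElem?_eq_getElem (by omega), Option.getD_some]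
    congr 1
    omega
  · rw [if_neg hn, PySem.List.pyGetD_eq_getElem xs d (by omega) (by omega),
        List.getElem?_eq_getElem (by omega), Option.getD_some]

-- reading the window at a (possibly negative) in-range lag = reading the flat list at base m + offset
theorem read_agree (S : List Int) (m : Nat) (L : Nat) (t : Int) (d : Int)
    (hS : S.length = L + m)
    (ht : PySem.Raise.InRange L t) :
    PySem.List.pyGetD (S.drop m) t d
      = PySem.List.pyGetD S ((m : Int) + (if t < 0 then t + L else t)) d := by
  rcases ht with ⟨hlo, hhi⟩
  have hwl : (S.drop m).length = L := by simp [hS]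
  have hu : 0 ≤ (if t < 0 then t + (L : Int) else t) ∧ (if t < 0 then t + (L : Int) else t) < L := by
    split <;> omega
  rw [pyGetD_inrange (S.drop m) t d (by omega) (by omega),
      PySem.List.pyGetD_eq_getElem S d (by omega) (by omega)]
  rw [List.getElem?_eq_getElem (by rw [hwl]; split at hu <;> omega), Option.getD_some,
      List.getElem_drop]
  congr 1
  rw [hwl]
  split <;> split at hu <;> omega

-- the two loop bodies, named for the invariant proof
def stepA (i j : Int) (st : List Int × List Int) (_ : Int) : List Int × List Int :=
  let v := PySem.Int.mod (PySem.List.pyGetD st.2 (i - 1) 0 + PySem.List.pyGetD st.2 (j - 1) 0) 1145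
  (st.1 ++ [v], PySem.List.slice st.2 (some 1) none ++ [v])

def stepB (a b : Int) (S : List Int) (t : Int) : List Int :=
  S ++ [PySem.Int.mod (PySem.List.pyGetD S (t + a) 0 + PySem.List.pyGetD S (t + b) 0) 1145]

-- loop invariant: after m steps, A's output list and window are suffixes of B's flat list
theorem invariant (i j : Int) (lfg : List Int) (m : Nat)
    (hi : PySem.Raise.InRange lfg.length (i - 1))
    (hj : PySem.Raise.InRange lfg.length (j - 1)) :
    let a : Int := if i - 1 < 0 then i - 1 + lfg.length else i - 1
    let b : Int := if j - 1 < 0 then j - 1 + lfg.length else j - 1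
    let F := (PySem.List.pyRange 0 (m : Int) 1).foldl (stepB a b) lfg
    let G := (PySem.List.pyRange 0 (m : Int) 1).foldl (stepA i j) (([] : List Int), lfg)
    F.length = lfg.length + m ∧ G.1 = F.drop lfg.length ∧ G.2 = F.drop m := by
  intro a b
  have hL : 0 < lfg.length := by
    rcases hi with ⟨h1, h2⟩; omega
  induction m with
  | zero =>
      simp [PySem.List.pyRange_one_eq_nil]
  | succ m ih =>
      obtain ⟨hlen, hout, hwin⟩ := ih
      have hsplit : PySem.List.pyRange 0 ((m : Int) + 1) 1
          = PySem.List.pyRange 0 (m : Int) 1 ++ [(m : Int)] := by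
        exact PySem.List.pyRange_one_succ_right (by omega)
      simp only [Nat.cast_succ, hsplit, List.foldl_append, List.foldl_cons, List.foldl_nil]
      set F := (PySem.List.pyRange 0 (m : Int) 1).foldl (stepB a b) lfg with hF
      set G := (PySem.List.pyRange 0 (m : Int) 1).foldl (stepA i j) (([] : List Int), lfg) with hG
      have hra : PySem.List.pyGetD G.2 (i - 1) 0 = PySem.List.pyGetD F ((m : Int) + a) 0 := by
        rw [hwin]; exact read_agree F m lfg.length (i - 1) 0 hlen hi
      have hrb : PySem.List.pyGetD G.2 (j - 1) 0 = PySem.List.pyGetD F ((m : Int) + b) 0 := by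
        rw [hwin]; exact read_agree F m lfg.length (j - 1) 0 hlen hj
      set v := PySem.Int.mod (PySem.List.pyGetD F ((m : Int) + a) 0 + PySem.List.pyGetD F ((m : Int) + b) 0) 1145 with hv
      have hmod : v = (PySem.List.pyGetD F ((m : Int) + a) 0 + PySem.List.pyGetD F ((m : Int) + b) 0) % 1145 := by
        rw [hv, PySem.Int.mod_eq_emod_of_pos (by norm_num)]
      have hstepB : stepB a b F (m : Int) = F ++ [v] := by
        simp [stepB, hmod]
      have hstepA : stepA i j G (m : Int) = (G.1 ++ [v], PySem.List.slice G.2 (some 1) none ++ [v]) := by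
        simp [stepA, hra, hrb, hmod]
      rw [hstepA, hstepB]
      refine ⟨by simp [hlen]; omega, ?_, ?_⟩
      · rw [hout, List.drop_append_of_le_length (by omega)]
      · rw [hwin, PySem.List.slice_from_one, List.drop_append_of_le_length (by omega),
            List.tail_drop]

-- ===== VERDICT (by name: the statement is the Claim_ definition above) =====
theorem gen_LFG_spec : Claim_equal_gen_LFG := by
  intro i j n lfg _ hpre
  unfold Spec_gen_LFG gen_LFG gen_LFG_alt
  simp only []
  by_cases hn : n ≤ 0
  · rw [PySem.List.pyRange_one_eq_nil hn]
    simp [PySem.List.slice_from_natCast]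
  · rcases hpre with hpre | ⟨hi, hj⟩
    · omega
    · have hn' : n = ((n.toNat : Nat) : Int) := by omega
      have := invariant i j lfg n.toNat hi hj
      obtain ⟨hlen, hout, hwin⟩ := this
      rw [hn']
      show ((PySem.List.pyRange 0 ((n.toNat : Nat) : Int) 1).foldl (stepA i j) (([] : List Int), lfg)).1
        = PySem.List.slice ((PySem.List.pyRange 0 ((n.toNat : Nat) : Int) 1).foldl
            (stepB (if i - 1 < 0 then i - 1 + lfg.length else i - 1)
                   (if j - 1 < 0 then j - 1 + lfg.length else j - 1)) lfg) (some (lfg.length : Int)) none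
      rw [hout, PySem.List.slice_from_natCast]
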